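-- pv_equiv track=rewrite | github.com/cce2955/TvCGUI-Main | tdp-modules/scan_normals_all.py | pick_best_block
-- ===== SOURCE A (Python) =====
-- from typing import Any, Dict, List, Optional, Sequence, Tuple
--
-- PAIR_RANGE = 0x600
--
-- def pick_best_block(mv_abs: int, blocks: List[Tuple[int, Any]],
--                     rng: int = PAIR_RANGE) -> Optional[Tuple[int, Any]]:
--     best: Optional[Tuple[int, Any]] = None
--     best_dist: Optional[int] = None
--     for addr, data in blocks:
--         if addr >= mv_abs:
--             d = addr - mv_abs
--             if d <= rng and (best_dist is None or d < best_dist):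
--                 best, best_dist = (addr, data), d
--     if best:
--         return best
--     for addr, data in blocks:
--         d = abs(addr - mv_abs)
--         if d <= rng and (best_dist is None or d < best_dist):
--             best, best_dist = (addr, data), d
--     return best
-- ===== SOURCE B (Python) =====
-- PAIR_RANGE = 0x600
--
-- def pick_best_block(mv_abs, blocks, rng=PAIR_RANGE):
--     best_fwd = None
--     best_fwd_dist = None
--     best_abs = None
--     best_abs_dist = None
--     for addr, data in blocks:
--         d = addr - mv_abs
--         if d >= 0 and d <= rng and (best_fwd_dist is None or d < best_fwd_dist):
--             best_fwd, best_fwd_dist = (addr, data), d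
--         da = abs(d)
--         if da <= rng and (best_abs_dist is None or da < best_abs_dist):
--             best_abs, best_abs_dist = (addr, data), da
--     return best_fwd if best_fwd is not None else best_abs
-- ===== Notes on version B (the rewrite author's own statement) =====
-- stated objective: alternative
-- what changed: Replaced A's two sequential scans (forward-only pass, then an absolute-distance pass) by one pass that maintains two running bests (forward and absolute) simultaneously and prefers the forward best at the end.
import Mathlib
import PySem

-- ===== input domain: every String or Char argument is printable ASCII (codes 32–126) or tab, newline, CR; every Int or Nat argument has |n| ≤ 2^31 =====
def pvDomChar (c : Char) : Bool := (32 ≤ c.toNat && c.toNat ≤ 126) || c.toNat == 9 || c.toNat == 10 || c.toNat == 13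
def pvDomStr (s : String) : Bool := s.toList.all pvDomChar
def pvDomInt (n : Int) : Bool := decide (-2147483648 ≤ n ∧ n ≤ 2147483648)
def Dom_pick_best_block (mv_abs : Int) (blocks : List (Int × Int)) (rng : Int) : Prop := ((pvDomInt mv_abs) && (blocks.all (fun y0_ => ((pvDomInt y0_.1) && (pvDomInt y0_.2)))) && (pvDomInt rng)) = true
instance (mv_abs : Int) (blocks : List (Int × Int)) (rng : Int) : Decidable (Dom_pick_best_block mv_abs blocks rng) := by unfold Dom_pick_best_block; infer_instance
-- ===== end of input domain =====

-- B replaces A's two sequential scans (forward pass, then absolute-distance pass) by one pass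
-- maintaining both running bests; objective: alternative decomposition, same O(n) cost.

-- ===== PORT A =====
-- step of A's FIRST loop: forward-only candidates, state (best, best_dist)
def pvFwdStep (mv_abs rng : Int) (st : Option (Int × Int) × Option Int) (b : Int × Int) :
    Option (Int × Int) × Option Int :=
  if mv_abs ≤ b.1 then
    let d := b.1 - mv_abs
    if d ≤ rng then
      match st.2 with
      | none => (some b, some d)
      | some bd => if d < bd then (some b, some d) else st
    else st
  else st

-- step of A's SECOND loop: absolute-distance candidates
def pvAbsStep (mv_abs rng : Int) (st : Option (Int × Int) × Option Int) (b : Int × Int) :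
    Option (Int × Int) × Option Int :=
  let d := |b.1 - mv_abs|
  if d ≤ rng then
    match st.2 with
    | none => (some b, some d)
    | some bd => if d < bd then (some b, some d) else st
  else st

def pick_best_block (mv_abs : Int) (blocks : List (Int × Int)) (rng : Int) : Option (Int × Int) :=
  let r := blocks.foldl (pvFwdStep mv_abs rng) (none, none)
  match r.1 with
  | some b => some b   -- `if best:` — a pair is always truthy
  | none => (blocks.foldl (pvAbsStep mv_abs rng) (none, r.2)).1

-- ===== PORT B =====
-- B: ONE pass maintaining both running bests ((best_fwd, best_fwd_dist), (best_abs, best_abs_dist))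
def pvBStep (mv_abs rng : Int)
    (st : (Option (Int × Int) × Option Int) × (Option (Int × Int) × Option Int)) (b : Int × Int) :
    (Option (Int × Int) × Option Int) × (Option (Int × Int) × Option Int) :=
  let d := b.1 - mv_abs
  let f :=
    if 0 ≤ d then
      if d ≤ rng then
        match st.1.2 with
        | none => (some b, some d)
        | some bd => if d < bd then (some b, some d) else st.1
      else st.1
    else st.1
  let da := |d|
  let a :=
    if da ≤ rng then
      match st.2.2 with
      | none => (some b, some da)
      | some bd => if da < bd then (some b, some da) else st.2
    else st.2
  (f, a)

def pick_best_block_alt (mv_abs : Int) (blocks : List (Int × Int)) (rng : Int) : Option (Int × Int) :=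
  let r := blocks.foldl (pvBStep mv_abs rng) ((none, none), (none, none))
  match r.1.1 with
  | some b => some b
  | none => r.2.1

-- ===== PRECONDITION & SPEC =====
def Spec_pick_best_block (mv_abs : Int) (blocks : List (Int × Int)) (rng : Int) (out : Option (Int × Int)) : Prop := out = pick_best_block_alt mv_abs blocks rng
instance (mv_abs : Int) (blocks : List (Int × Int)) (rng : Int) (out : Option (Int × Int)) : Decidable (Spec_pick_best_block mv_abs blocks rng out) := by unfold Spec_pick_best_block; infer_instance

-- ===== CLAIM (what is proved, stated in full; the proofs are below) =====
def Claim_equal_pick_best_block : Prop := ∀ (mv_abs : Int) (blocks : List (Int × Int)) (rng : Int), Dom_pick_best_block mv_abs blocks rng → Spec_pick_best_block mv_abs blocks rng (pick_best_block mv_abs blocks rng)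

-- ===== LEMMAS AND PROOFS =====

-- ===== VERDICT (by name: the statement is the Claim_ definition above) =====
-- B's merged step is the product of A's two steps
lemma pvBStep_eq (mv_abs rng : Int) (s1 s2 : Option (Int × Int) × Option Int) (b : Int × Int) :
    pvBStep mv_abs rng (s1, s2) b = (pvFwdStep mv_abs rng s1 b, pvAbsStep mv_abs rng s2 b) := by
  simp only [pvBStep, pvFwdStep, pvAbsStep]
  by_cases h : mv_abs ≤ b.1
  · rw [if_pos h, if_pos (by omega : (0:Int) ≤ b.1 - mv_abs)]
  · rw [if_neg h, if_neg (by omega : ¬(0:Int) ≤ b.1 - mv_abs)]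

-- B's single fold is the pair of A's two folds
lemma pvFold_eq (mv_abs rng : Int) (blocks : List (Int × Int))
    (s1 s2 : Option (Int × Int) × Option Int) :
    blocks.foldl (pvBStep mv_abs rng) (s1, s2)
      = (blocks.foldl (pvFwdStep mv_abs rng) s1, blocks.foldl (pvAbsStep mv_abs rng) s2) := by
  induction blocks generalizing s1 s2 with
  | nil => rfl
  | cons b bs ih => simp [List.foldl, pvBStep_eq, ih]

-- one forward step keeps best and best_dist none together
lemma pvFwdStep_inv (mv_abs rng : Int) (st : Option (Int × Int) × Option Int) (b : Int × Int)
    (h : st.1 = none → st.2 = none) :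
    (pvFwdStep mv_abs rng st b).1 = none → (pvFwdStep mv_abs rng st b).2 = none := by
  simp only [pvFwdStep]
  split
  · split
    · cases hs : st.2 with
      | none => simp
      | some bd =>
        simp only [hs]
        split
        · simp
        · exact h
    · exact h
  · exact h

-- in the forward fold, best and best_dist are none together
lemma pvFwd_inv (mv_abs rng : Int) (blocks : List (Int × Int))
    (st : Option (Int × Int) × Option Int) (h : st.1 = none → st.2 = none) :
    (blocks.foldl (pvFwdStep mv_abs rng) st).1 = none →
      (blocks.foldl (pvFwdStep mv_abs rng) st).2 = none := by
  induction blocks generalizing st with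
  | nil => exact h
  | cons b bs ih => exact ih _ (pvFwdStep_inv mv_abs rng st b h)

theorem pick_best_block_spec : Claim_equal_pick_best_block := by
  intro mv_abs blocks rng _
  show pick_best_block mv_abs blocks rng = pick_best_block_alt mv_abs blocks rng
  simp only [pick_best_block, pick_best_block_alt, pvFold_eq]
  cases hF : (blocks.foldl (pvFwdStep mv_abs rng) (none, none)).1 with
  | some b => simp

  | none =>
    have h2 := pvFwd_inv mv_abs rng blocks (none, none) (fun _ => rfl) hF
    simp [h2]
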